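-- pv_equiv track=rewrite | github.com/Godul/advent-of-code-2020 | day21/solution.py | calc_possible_dict
-- ===== SOURCE A (Python) =====
-- from typing import (
--     Dict,
--     List,
--     Set,
--     Tuple,
-- )
--
-- def calc_possible_dict(food_list: List[Tuple[List[str], List[str]]]):
--     possible_dict = {}
--
--     for products, allergens in food_list:
--         for allergen in allergens:
--             if allergen not in possible_dict:
--                 possible_dict[allergen] = set(products)
--             else:
--                 possible_dict[allergen].intersection_update(products)
--
--     return possible_dict
-- ===== SOURCE B (Python) =====
-- def calc_possible_dict(food_list):
--     # Two-pass decomposition: group each allergen's product lists in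
--     # first-encounter order, then collapse each group by intersection.
--     groups = {}
--     for products, allergens in food_list:
--         for allergen in allergens:
--             groups[allergen] = groups.get(allergen, []) + [products]
--     result = {}
--     for allergen, plists in groups.items():
--         acc = set(plists[0])
--         for pl in plists[1:]:
--             acc = acc.intersection(pl)
--         result[allergen] = acc
--     return result
-- ===== Notes on version B (the rewrite author's own statement) =====
-- stated objective: alternative
-- what changed: A streams foods and keeps a running intersection per allergen inside one pass; B first groups every allergen's product lists into an ordered index and only then collapses each group to its intersection in a second pass.
import Mathlib
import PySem

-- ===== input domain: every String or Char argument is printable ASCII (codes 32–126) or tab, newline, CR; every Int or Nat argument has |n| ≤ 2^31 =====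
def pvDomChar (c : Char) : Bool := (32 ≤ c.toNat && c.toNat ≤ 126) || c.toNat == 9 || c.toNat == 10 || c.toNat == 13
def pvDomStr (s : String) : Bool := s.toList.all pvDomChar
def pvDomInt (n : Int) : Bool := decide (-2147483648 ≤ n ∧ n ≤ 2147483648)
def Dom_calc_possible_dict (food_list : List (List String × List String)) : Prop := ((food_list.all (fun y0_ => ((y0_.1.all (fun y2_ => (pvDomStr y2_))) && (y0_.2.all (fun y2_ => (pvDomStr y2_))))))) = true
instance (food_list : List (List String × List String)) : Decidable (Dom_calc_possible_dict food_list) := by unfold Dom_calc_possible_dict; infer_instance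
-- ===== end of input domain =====

-- B replaces A's single-pass running-intersection dict by a two-pass decomposition
-- (group each allergen's product lists, then collapse each group by intersection);
-- objective: alternative (same cost, different structure).


-- ===== PORT A =====
def calc_possible_dict (food_list : List (List String × List String)) : List (String × List String) :=
  (food_list.foldl (fun d pa =>
      pa.2.foldl (fun d allergen =>
        if !d.contains allergen then
          d.insert allergen (PySem.Set.ofList pa.1)
        else
          d.modify allergen [] (fun s => PySem.Set.inter s pa.1)) d)
    PySem.Dict.empty).items

-- ===== PORT B =====
-- acc = set(plists[0]); for pl in plists[1:]: acc = acc.intersection(pl)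
-- (the [] case is unreachable in calc_possible_dict_alt: every group is nonempty)
def pvCollapse (plists : List (List String)) : List String :=
  match plists with
  | [] => []
  | l :: rest => rest.foldl (fun acc pl => PySem.Set.inter acc pl) (PySem.Set.ofList l)

def calc_possible_dict_alt (food_list : List (List String × List String)) : List (String × List String) :=
  let groups := food_list.foldl (fun d pa =>
      pa.2.foldl (fun d allergen =>
        d.modify allergen [] (fun ls => ls ++ [pa.1])) d)
    PySem.Dict.empty
  (groups.items.foldl (fun r p => r.insert p.1 (pvCollapse p.2)) PySem.Dict.empty).items

-- ===== PRECONDITION & SPEC =====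
def Spec_calc_possible_dict (food_list : List (List String × List String)) (out : List (String × List String)) : Prop := out = calc_possible_dict_alt food_list
instance (food_list : List (List String × List String)) (out : List (String × List String)) : Decidable (Spec_calc_possible_dict food_list out) := by unfold Spec_calc_possible_dict; infer_instance

-- ===== CLAIM (what is proved, stated in full; the proofs are below) =====
def Claim_equal_calc_possible_dict : Prop := ∀ (food_list : List (List String × List String)), Dom_calc_possible_dict food_list → Spec_calc_possible_dict food_list (calc_possible_dict food_list)

-- ===== LEMMAS AND PROOFS =====

-- A's per-allergen step
def pvStepA (prods : List String) (d : PySem.Dict String (List String)) (allergen : String) :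
    PySem.Dict String (List String) :=
  if !d.contains allergen then
    d.insert allergen (PySem.Set.ofList prods)
  else
    d.modify allergen [] (fun s => PySem.Set.inter s prods)

-- B's per-allergen step
def pvStepB (prods : List String) (d : PySem.Dict String (List (List String))) (allergen : String) :
    PySem.Dict String (List (List String)) :=
  d.modify allergen [] (fun ls => ls ++ [prods])

-- the coupling invariant between A's dict and B's grouping dict
def pvInv (dA : PySem.Dict String (List String)) (dG : PySem.Dict String (List (List String))) : Prop :=
  dA.items = dG.items.map (fun p => (p.1, pvCollapse p.2)) ∧
  dG.keys.Nodup ∧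
  ∀ p ∈ dG.items, p.2 ≠ []

theorem pvCollapse_append (g : List (List String)) (l : List String) (hg : g ≠ []) :
    pvCollapse (g ++ [l]) = PySem.Set.inter (pvCollapse g) l := by
  cases g with
  | nil => exact absurd rfl hg
  | cons h t => simp [pvCollapse, List.foldl_append]

theorem pvInv_keys {dA : PySem.Dict String (List String)}
    {dG : PySem.Dict String (List (List String))} (h : pvInv dA dG) : dA.keys = dG.keys := by
  simp [PySem.Dict.keys, h.1]

theorem pvInv_step (prods : List String) (allergen : String)
    (dA : PySem.Dict String (List String)) (dG : PySem.Dict String (List (List String)))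
    (h : pvInv dA dG) : pvInv (pvStepA prods dA allergen) (pvStepB prods dG allergen) := by
  obtain ⟨hitems, hnd, hne⟩ := h
  have hcont : dA.contains allergen = dG.contains allergen := by
    rw [PySem.Dict.contains_eq_decide_mem_keys, PySem.Dict.contains_eq_decide_mem_keys,
      pvInv_keys ⟨hitems, hnd, hne⟩]
  by_cases hc : dG.contains allergen = true
  · -- existing key: A intersects, B appends
    have hcA : dA.contains allergen = true := by rw [hcont]; exact hc
    have hmemk : allergen ∈ dG.keys := (PySem.Dict.contains_iff_mem_keys _ _).1 hc
    -- the current group g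
    obtain ⟨g, hg⟩ : ∃ g, dG.get? allergen = some g := by
      cases hget : dG.get? allergen with
      | none =>
        exfalso
        exact ((PySem.Dict.get?_eq_none_iff_not_mem_keys _ _).1 hget) hmemk
      | some v => exact ⟨v, rfl⟩
    have hgmem : (allergen, g) ∈ dG.items := PySem.Dict.mem_items_of_get?_eq_some _ hg
    have hgD : dG.getD allergen [] = g := PySem.Dict.getD_of_get?_eq_some _ _ hg
    have hgne : g ≠ [] := hne _ hgmem
    have hAmem : (allergen, pvCollapse g) ∈ dA.items := by
      rw [hitems]; exact List.mem_map.2 ⟨(allergen, g), hgmem, rfl⟩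
    have hAnd : dA.keys.Nodup := by rw [pvInv_keys ⟨hitems, hnd, hne⟩]; exact hnd
    have hAgD : dA.getD allergen [] = pvCollapse g :=
      PySem.Dict.getD_of_mem_items _ hAmem hAnd _
    have hstepA : pvStepA prods dA allergen
        = dA.insert allergen (PySem.Set.inter (dA.getD allergen []) prods) := by
      simp [pvStepA, hcA]; rfl
    have hstepB : pvStepB prods dG allergen
        = dG.insert allergen (dG.getD allergen [] ++ [prods]) := rfl
    refine ⟨?_, ?_, ?_⟩
    · rw [hstepA, hstepB, PySem.Dict.items_insert_of_contains _ _ hcA,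
        PySem.Dict.items_insert_of_contains _ _ hc, hitems, List.map_map, List.map_map]
      apply List.map_congr_left
      intro p _
      by_cases hp : p.1 = allergen
      · simp [Function.comp, hp, hAgD, hgD, pvCollapse_append g prods hgne]
      · simp [Function.comp, hp]
    · rw [hstepB, PySem.Dict.keys_insert_of_contains _ _ hc]; exact hnd
    · intro p hp
      rw [hstepB] at hp
      rcases (PySem.Dict.mem_items_insert _ _ _ _).1 hp with hpe | ⟨hpm, _⟩
      · rw [hpe]; simp
      · exact hne _ hpm
  · -- new key: both append a fresh entry
    have hc' : dG.contains allergen = false := by simpa using hc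
    have hcA : dA.contains allergen = false := by rw [hcont]; exact hc'
    have hstepA : pvStepA prods dA allergen
        = dA.insert allergen (PySem.Set.ofList prods) := by
      simp [pvStepA, hcA]
    have hstepB : pvStepB prods dG allergen = dG.insert allergen [prods] := by
      simp [pvStepB]
      have : dG.getD allergen [] = [] := PySem.Dict.getD_of_not_contains _ _ hc'
      show dG.insert allergen (dG.getD allergen [] ++ [prods]) = _
      rw [this]; rfl
    refine ⟨?_, ?_, ?_⟩
    · rw [hstepA, hstepB, PySem.Dict.items_insert_of_not_contains _ _ hcA,
        PySem.Dict.items_insert_of_not_contains _ _ hc', hitems, List.map_append]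
      rfl
    · rw [hstepB, PySem.Dict.keys_insert_of_not_contains _ _ hc']
      refine List.Nodup.append hnd (List.nodup_singleton _) ?_
      intro x hx hx'
      rw [List.mem_singleton] at hx'
      subst hx'
      exact absurd ((PySem.Dict.contains_iff_mem_keys _ _).2 hx) (by simp [hc'])
    · intro p hp
      rw [hstepB] at hp
      rcases (PySem.Dict.mem_items_insert _ _ _ _).1 hp with hpe | ⟨hpm, _⟩
      · rw [hpe]; simp
      · exact hne _ hpm

theorem pvInv_inner (prods : List String) (allergens : List String)
    (dA : PySem.Dict String (List String)) (dG : PySem.Dict String (List (List String)))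
    (h : pvInv dA dG) :
    pvInv (allergens.foldl (pvStepA prods) dA) (allergens.foldl (pvStepB prods) dG) := by
  induction allergens generalizing dA dG with
  | nil => exact h
  | cons a rest ih => exact ih _ _ (pvInv_step prods a dA dG h)

theorem pvInv_outer (food_list : List (List String × List String))
    (dA : PySem.Dict String (List String)) (dG : PySem.Dict String (List (List String)))
    (h : pvInv dA dG) :
    pvInv
      (food_list.foldl (fun d pa => pa.2.foldl (pvStepA pa.1) d) dA)
      (food_list.foldl (fun d pa => pa.2.foldl (pvStepB pa.1) d) dG) := by
  induction food_list generalizing dA dG with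
  | nil => exact h
  | cons pa rest ih => exact ih _ _ (pvInv_inner pa.1 pa.2 dA dG h)

theorem pvInv_empty : pvInv PySem.Dict.empty PySem.Dict.empty := by
  refine ⟨rfl, ?_, ?_⟩ <;> simp [PySem.Dict.empty, PySem.Dict.keys]

-- ===== VERDICT (by name: the statement is the Claim_ definition above) =====
theorem calc_possible_dict_spec : Claim_equal_calc_possible_dict := by
  intro food_list _
  unfold Spec_calc_possible_dict calc_possible_dict calc_possible_dict_alt
  have hinv := pvInv_outer food_list PySem.Dict.empty PySem.Dict.empty pvInv_empty
  obtain ⟨hitems, hnd, _⟩ := hinv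
  set dG := food_list.foldl (fun d pa => pa.2.foldl (pvStepB pa.1) d) PySem.Dict.empty with hdG
  have hfresh :
      ((dG.items.foldl (fun r p => r.insert p.1 (pvCollapse p.2)) PySem.Dict.empty)).items
      = PySem.Dict.empty.items ++ dG.items.map (fun p => (p.1, pvCollapse p.2)) := by
    refine PySem.Dict.items_foldl_insert_fresh dG.items (fun p => p.1) (fun p => pvCollapse p.2)
      PySem.Dict.empty (fun p _ => PySem.Dict.contains_empty _) ?_
    simpa [PySem.Dict.keys] using hnd
  show (food_list.foldl (fun d pa => pa.2.foldl (pvStepA pa.1) d) PySem.Dict.empty).items = _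
  rw [hitems]
  show _ = (List.foldl (fun r p => r.insert p.1 (pvCollapse p.2)) PySem.Dict.empty dG.items).items
  rw [hfresh]
  rfl
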